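-- pv_equiv track=rewrite | github.com/deven2UIC/automatic-parakeet | Project 4/Memory.py | _list_to_int
-- ===== SOURCE A (Python) =====
-- def _list_to_int(val):
--     val0 = bin(val[0])[2:].zfill(8)
--     val1 = bin(val[1])[2:].zfill(8)
--     val2 = bin(val[2])[2:].zfill(8)
--     val3 = bin(val[3])[2:].zfill(8)
--     val = val0 + val1 + val2 + val3
--
--     val_int = 0
--     if val[0] == '1':
--         for i in range(len(val)):
--             if val[i] == '0':
--                 val_int += 2 ** (31 - i)
--         val_int += 1
--         val_int *= -1
--     else:
--         val_int = int(val, 2)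
--
--     return val_int
-- ===== SOURCE B (Python) =====
-- def _list_to_int(val):
--     # Direct base-256 composition + two's-complement correction,
--     # instead of building a 32-char binary string and counting zero bits.
--     v = val[0] * 16777216 + val[1] * 65536 + val[2] * 256 + val[3]
--     return v - 4294967296 if v >= 2147483648 else v
-- ===== Notes on version B (the rewrite author's own statement) =====
-- stated objective: simpler
-- what changed: Replaces A's binary-string construction (bin/zfill/concatenation) and per-character zero-bit counting with direct base-256 integer arithmetic followed by a single two's-complement correction.
-- outside the precondition, e.g. on _list_to_int([1, 300, 0, 0]): A returns 53215232, B returns 36438016; on _list_to_int([128, 300, 0, 0]): A returns -2137653248.5, B returns -2127822848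
import Mathlib
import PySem

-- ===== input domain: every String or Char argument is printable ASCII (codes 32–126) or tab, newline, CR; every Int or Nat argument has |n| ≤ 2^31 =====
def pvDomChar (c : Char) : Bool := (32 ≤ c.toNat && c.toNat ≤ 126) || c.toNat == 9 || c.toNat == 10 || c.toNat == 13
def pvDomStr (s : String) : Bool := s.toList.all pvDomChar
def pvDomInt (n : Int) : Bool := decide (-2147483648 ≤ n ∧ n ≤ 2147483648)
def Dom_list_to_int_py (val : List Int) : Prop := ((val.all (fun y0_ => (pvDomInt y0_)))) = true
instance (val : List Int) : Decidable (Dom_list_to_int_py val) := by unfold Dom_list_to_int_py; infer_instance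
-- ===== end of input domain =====

-- B replaces A's binary-string construction and zero-bit counting by direct base-256
-- arithmetic with a two's-complement correction (objective: simpler).

-- ===== PORT A =====

-- binary digits of n (msb first), n > 0; hand port of the digit part of Python's bin()
-- (fuel-structured so the kernel reduces it; fuel = n always suffices)
def pvNatBitsAux : Nat → Nat → List Char
  | 0, _ => []
  | fuel+1, n => if n = 0 then [] else pvNatBitsAux fuel (n / 2) ++ [if n % 2 = 1 then '1' else '0']

def pvNatBits (n : Nat) : List Char := pvNatBitsAux n n

-- bin(n): '0b'+digits, '-0b'+digits for n < 0 (exact hand port of bin())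
def pvBin (n : Int) : List Char :=
  if n < 0 then '-' :: '0' :: 'b' :: pvNatBits (-n).toNat
  else '0' :: 'b' :: (if n = 0 then ['0'] else pvNatBits n.toNat)

-- bin(n)[2:]
def pvBin2 (n : Int) : List Char := PySem.List.slice (pvBin n) (some 2) none

-- s.zfill(8); exact here because bin(n)[2:] never starts with a sign character
def pvZfill8 (s : List Char) : List Char := List.replicate (8 - s.length) '0' ++ s

def pvBit (c : Char) : Int := if c = '1' then 1 else 0

-- int(s, 2): hand port, exact on the nonempty all-'0'/'1' strings A feeds it under Pre_
def pvIntOfBin (s : List Char) : Int := s.foldl (fun a c => 2 * a + pvBit c) 0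

def list_to_int_py (val : List Int) : Int :=
  let val0 := pvZfill8 (pvBin2 (PySem.List.pyGetD val 0 0))
  let val1 := pvZfill8 (pvBin2 (PySem.List.pyGetD val 1 0))
  let val2 := pvZfill8 (pvBin2 (PySem.List.pyGetD val 2 0))
  let val3 := pvZfill8 (pvBin2 (PySem.List.pyGetD val 3 0))
  let v := val0 ++ val1 ++ val2 ++ val3
  let val_int : Int := 0
  if PySem.List.pyGetD v 0 ' ' = '1' then
    let val_int := (PySem.List.pyRange 0 (v.length : Int) 1).foldl
      (fun acc i => if PySem.List.pyGetD v i ' ' = '0' then acc + 2 ^ ((31 : Int) - i).toNat else acc)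
      val_int
    let val_int := val_int + 1
    let val_int := val_int * (-1)
    val_int
  else
    pvIntOfBin v

-- ===== PORT B =====
def list_to_int_py_alt (val : List Int) : Int :=
  let v := PySem.List.pyGetD val 0 0 * 16777216 + PySem.List.pyGetD val 1 0 * 65536 +
           PySem.List.pyGetD val 2 0 * 256 + PySem.List.pyGetD val 3 0
  if v ≥ 2147483648 then v - 4294967296 else v

-- ===== PRECONDITION & SPEC =====
-- Pre_ is the natural domain: at least 4 elements, the first 4 being bytes 0..255.
-- Outside it A raises (IndexError on short lists, ValueError on negative bytes reaching
-- int(...,2)) or returns accidental values from misaligned bit strings (a float, or an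
-- int composed with shifts wider than 8 bits) when an element exceeds 255.
def Pre_list_to_int_py (val : List Int) : Prop :=
  4 ≤ val.length ∧ ∀ x ∈ val.take 4, 0 ≤ x ∧ x < 256
instance (val : List Int) : Decidable (Pre_list_to_int_py val) := by
  unfold Pre_list_to_int_py; infer_instance

def pvWitness_list_to_int_py : List Int := [128, 0, 3, 255]

def Spec_list_to_int_py (val : List Int) (out : Int) : Prop := out = list_to_int_py_alt val
instance (val : List Int) (out : Int) : Decidable (Spec_list_to_int_py val out) := by
  unfold Spec_list_to_int_py; infer_instance

-- ===== CLAIM (what is proved, stated in full; the proofs are below) =====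
def Claim_equal_list_to_int_py : Prop :=
  ∀ (val : List Int), Dom_list_to_int_py val → Pre_list_to_int_py val →
    Spec_list_to_int_py val (list_to_int_py val)

-- ===== LEMMAS AND PROOFS =====

def pvAllBin (s : List Char) : Prop := ∀ c ∈ s, c = '0' ∨ c = '1'

lemma pvIntOfBin_foldl (s : List Char) (a : Int) :
    s.foldl (fun a c => 2 * a + pvBit c) a = a * 2 ^ s.length + pvIntOfBin s := by
  induction s generalizing a with
  | nil => simp [pvIntOfBin]
  | cons c t ih =>
    simp only [List.foldl_cons, List.length_cons, pvIntOfBin]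
    rw [ih, ih (2 * 0 + pvBit c)]
    ring

lemma pvIntOfBin_cons (c : Char) (t : List Char) :
    pvIntOfBin (c :: t) = pvBit c * 2 ^ t.length + pvIntOfBin t := by
  simp only [pvIntOfBin, List.foldl_cons]
  rw [pvIntOfBin_foldl t]
  simp only [pvIntOfBin]; ring

lemma pvIntOfBin_append (s t : List Char) :
    pvIntOfBin (s ++ t) = pvIntOfBin s * 2 ^ t.length + pvIntOfBin t := by
  simp only [pvIntOfBin, List.foldl_append]
  rw [pvIntOfBin_foldl t]
  simp only [pvIntOfBin]

lemma pvIntOfBin_bounds (s : List Char) (h : pvAllBin s) :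
    0 ≤ pvIntOfBin s ∧ pvIntOfBin s < 2 ^ s.length := by
  induction s with
  | nil => simp [pvIntOfBin]
  | cons c t ih =>
    obtain ⟨h0, h1⟩ := ih (fun x hx => h x (List.mem_cons_of_mem _ hx))
    have hb : pvBit c = 0 ∨ pvBit c = 1 := by
      rcases h c List.mem_cons_self with hc | hc <;> simp [pvBit, hc]
    rw [pvIntOfBin_cons]
    have hp : (0:Int) < 2 ^ t.length := by positivity
    constructor
    · rcases hb with hb | hb <;> nlinarith
    · simp only [List.length_cons, pow_succ]
      rcases hb with hb | hb <;> nlinarith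

-- the zero-bit counting loop computes the ones' complement of the string's value
lemma pvZeroLoop (s : List Char) (m : Nat) (acc : Int)
    (hb : pvAllBin s) (hm : s.length ≤ m + 1) :
    (List.range s.length).foldl
      (fun a k => if s.getD k ' ' = '0' then a + (2:Int) ^ (m - k) else a) acc
    = acc + ((2:Int) ^ s.length - 1 - pvIntOfBin s) * 2 ^ (m + 1 - s.length) := by
  induction s generalizing m acc with
  | nil => simp [pvIntOfBin]
  | cons c t ih =>
    have hbt : pvAllBin t := fun x hx => hb x (List.mem_cons_of_mem _ hx)
    by_cases hm0 : t.length = 0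
    · -- t = []
      have ht : t = [] := List.eq_nil_of_length_eq_zero hm0
      subst ht
      have hc := hb c List.mem_cons_self
      rcases hc with hc | hc <;>
        simp [hc, pvIntOfBin, pvBit, List.range_succ]
    · have hLm : t.length ≤ m := by
        have := hm; simp only [List.length_cons] at this; omega
      have hm1 : 1 ≤ m := by omega
      simp only [List.length_cons, List.range_succ_eq_map, List.foldl_cons, List.foldl_map]
      have hfun : (fun (x : Int) (y : Nat) =>
            if (c :: t).getD y.succ ' ' = '0' then x + (2:Int) ^ (m - y.succ) else x)
          = (fun a k => if t.getD k ' ' = '0' then a + (2:Int) ^ ((m - 1) - k) else a) := by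
        funext x y
        have hy : m - y.succ = (m - 1) - y := by omega
        simp [hy]
      rw [hfun, ih _ _ hbt (by omega)]
      have hms : m - 1 + 1 - t.length = m - t.length := by omega
      rw [hms]
      have hpow : (2:Int) ^ t.length * 2 ^ (m - t.length) = 2 ^ m := by
        rw [← pow_add]; congr 1; omega
      have hms2 : m + 1 - (t.length + 1) = m - t.length := by omega
      rw [pvIntOfBin_cons, hms2]
      rcases hb c List.mem_cons_self with hc | hc
      · simp only [hc, List.getD_cons_zero, Nat.sub_zero]
        simp only [pvBit, reduceIte, Char.reduceEq]
        rw [pow_succ]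
        linear_combination -hpow
      · simp only [hc, List.getD_cons_zero, Nat.sub_zero]
        simp only [pvBit, reduceIte, Char.reduceEq]
        rw [pow_succ]
        ring

set_option maxRecDepth 8192 in
-- per-byte facts about A's zfill(8)-padded bin string, checked for all 256 bytes
lemma pvByte_facts_fin : ∀ n : Fin 256,
    (pvZfill8 (pvBin2 (n : Int))).length = 8 ∧
    ((pvZfill8 (pvBin2 (n : Int))).all fun c => c = '0' || c = '1') = true ∧
    pvIntOfBin (pvZfill8 (pvBin2 (n : Int))) = (n : Int) := by decide

lemma pvByte_facts (m : Int) (h0 : 0 ≤ m) (h1 : m < 256) :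
    (pvZfill8 (pvBin2 m)).length = 8 ∧ pvAllBin (pvZfill8 (pvBin2 m)) ∧
    pvIntOfBin (pvZfill8 (pvBin2 m)) = m := by
  have hm : m = ((⟨m.toNat, by omega⟩ : Fin 256) : Int) := by simp; omega
  obtain ⟨hl, ha, hv⟩ := pvByte_facts_fin ⟨m.toNat, by omega⟩
  rw [hm]
  refine ⟨hl, ?_, hv⟩
  intro c hc
  have := List.all_eq_true.mp ha c hc
  simpa using this

-- the index loop of A, bridged from pyRange/Int indices to List.range/Nat indices
lemma pvLoop_bridge (v : List Char) :
    (PySem.List.pyRange 0 (v.length : Int) 1).foldl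
      (fun acc i => if PySem.List.pyGetD v i ' ' = '0' then acc + 2 ^ ((31 : Int) - i).toNat else acc)
      0
    = (List.range v.length).foldl
      (fun a k => if v.getD k ' ' = '0' then a + (2:Int) ^ (31 - k) else a) 0 := by
  rw [PySem.List.pyRange_one]
  simp only [sub_zero, Int.toNat_natCast, List.foldl_map, zero_add]
  apply List.foldl_ext
  intro a k _
  have h1 : PySem.List.pyGetD v (k : Int) ' ' = v.getD k ' ' := PySem.List.pyGetD_natCast v k ' '
  have h2 : ((31 : Int) - (k : Int)).toNat = 31 - k := by omega
  rw [h1, h2]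

-- ===== VERDICT (by name: the statement is the Claim_ definition above) =====
theorem list_to_int_py_spec : Claim_equal_list_to_int_py := by
  intro val _ hpre
  obtain ⟨hlen, hbytes⟩ := hpre
  match val with
  | a :: b :: c :: d :: rest =>
    have ha := hbytes a (by simp)
    have hb := hbytes b (by simp)
    have hc := hbytes c (by simp)
    have hd := hbytes d (by simp)
    obtain ⟨hl0, hab0, hv0⟩ := pvByte_facts a ha.1 ha.2
    obtain ⟨hl1, hab1, hv1⟩ := pvByte_facts b hb.1 hb.2
    obtain ⟨hl2, hab2, hv2⟩ := pvByte_facts c hc.1 hc.2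
    obtain ⟨hl3, hab3, hv3⟩ := pvByte_facts d hd.1 hd.2
    unfold Spec_list_to_int_py list_to_int_py list_to_int_py_alt
    dsimp only
    have hg0 : PySem.List.pyGetD (a :: b :: c :: d :: rest) (0:Int) 0 = a := by
      exact PySem.List.pyGetD_zero_cons _ _ _
    have hg1 : PySem.List.pyGetD (a :: b :: c :: d :: rest) (1:Int) 0 = b := by
      simpa using PySem.List.pyGetD_natCast (a :: b :: c :: d :: rest) 1 0
    have hg2 : PySem.List.pyGetD (a :: b :: c :: d :: rest) (2:Int) 0 = c := by
      simpa using PySem.List.pyGetD_natCast (a :: b :: c :: d :: rest) 2 0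
    have hg3 : PySem.List.pyGetD (a :: b :: c :: d :: rest) (3:Int) 0 = d := by
      simpa using PySem.List.pyGetD_natCast (a :: b :: c :: d :: rest) 3 0
    rw [hg0, hg1, hg2, hg3]
    set B0 := pvZfill8 (pvBin2 a) with hB0
    set B1 := pvZfill8 (pvBin2 b) with hB1
    set B2 := pvZfill8 (pvBin2 c) with hB2
    set B3 := pvZfill8 (pvBin2 d) with hB3
    set v := B0 ++ B1 ++ B2 ++ B3 with hv
    have hvlen : v.length = 32 := by simp [hv, hl0, hl1, hl2, hl3]
    have hvbin : pvAllBin v := by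
      intro x hx
      simp only [hv, List.mem_append] at hx
      rcases hx with ((hx | hx) | hx) | hx
      · exact hab0 x hx
      · exact hab1 x hx
      · exact hab2 x hx
      · exact hab3 x hx
    have hvval : pvIntOfBin v = a * 16777216 + b * 65536 + c * 256 + d := by
      simp only [hv, pvIntOfBin_append, hl1, hl2, hl3, hv0, hv1, hv2, hv3]
      ring
    -- head character of v
    have hB0ne : B0 ≠ [] := by intro h; rw [h] at hl0; simp at hl0
    obtain ⟨c0, t0, hB0eq⟩ := List.exists_cons_of_ne_nil hB0ne
    have hvhead : PySem.List.pyGetD v (0:Int) ' ' = c0 := by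
      rw [hv, hB0eq]; simp only [List.cons_append]
      exact PySem.List.pyGetD_zero_cons _ _ _
    have ht0len : t0.length = 7 := by rw [hB0eq] at hl0; simpa using hl0
    have ht0b : pvAllBin t0 := by
      intro x hx; exact hab0 x (by rw [hB0eq]; exact List.mem_cons_of_mem _ hx)
    have ht0bd := pvIntOfBin_bounds t0 ht0b
    rw [ht0len] at ht0bd
    have ha128 : pvBit c0 = 1 ↔ 128 ≤ a := by
      have : pvIntOfBin B0 = a := hv0
      rw [hB0eq, pvIntOfBin_cons, ht0len] at this
      have hbit : pvBit c0 = 0 ∨ pvBit c0 = 1 := by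
        rcases hab0 c0 (by rw [hB0eq]; exact List.mem_cons_self) with h | h <;> simp [pvBit, h]
      constructor
      · intro h1; rw [h1] at this; norm_num at this ⊢; omega
      · intro h128
        rcases hbit with h0 | h1
        · rw [h0] at this; norm_num at this; omega
        · exact h1
    have hbig : c0 = '1' ↔ 2147483648 ≤ a * 16777216 + b * 65536 + c * 256 + d := by
      have hc0bin := hab0 c0 (by rw [hB0eq]; exact List.mem_cons_self)
      constructor
      · intro h1
        have : pvBit c0 = 1 := by simp [pvBit, h1]
        have h128 := ha128.mp this
        nlinarith [hb.1, hc.1, hd.1]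
      · intro hge
        have h128 : 128 ≤ a := by nlinarith [hb.2, hc.2, hd.2, hb.1, hc.1, hd.1]
        have := ha128.mpr h128
        rcases hc0bin with h | h
        · rw [h] at this; simp [pvBit] at this
        · exact h
    rw [hvhead]
    by_cases hcase : c0 = '1'
    · rw [if_pos hcase, if_pos (by exact_mod_cast hbig.mp hcase)]
      rw [pvLoop_bridge v]
      rw [pvZeroLoop v 31 0 hvbin (by omega)]
      rw [hvlen, hvval]
      push_cast
      ring_nf
    · have hc0 : c0 = '0' := by
        rcases hab0 c0 (by rw [hB0eq]; exact List.mem_cons_self) with h | h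
        · exact h
        · exact absurd h hcase
      rw [if_neg (by rw [hc0]; decide)]
      have hlt : a * 16777216 + b * 65536 + c * 256 + d < 2147483648 := by
        by_contra hge
        exact hcase (hbig.mpr (by omega))
      rw [if_neg (by omega), hvval]
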